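-- pv_equiv track=rewrite | github.com/sjh2428/algo | src/3085.py | check_max_eat_cnt
-- ===== SOURCE A (Python) =====
-- def check_max_eat_cnt(box):
--     answer = []
--
--     for i in range(len(box)):
--         cnt = 1
--         for j in range(1, len(box)):
--             if box[i][j - 1] == box[i][j]:
--                 cnt += 1
--             else:
--                 answer.append(cnt)
--                 cnt = 1
--         answer.append(cnt)
--
--     for i in range(len(box)):
--         cnt = 1
--         for j in range(1, len(box)):
--             if box[j - 1][i] == box[j][i]:
--                 cnt += 1
--             else:
--                 answer.append(cnt)
--                 cnt = 1
--         answer.append(cnt)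
--
--     return max(answer)
-- ===== SOURCE B (Python) =====
-- def _runs(seq):
--     # maximal runs of equal adjacent values, by recursive run-splitting
--     if not seq:
--         return []
--     k = 1
--     while k < len(seq) and seq[k] == seq[0]:
--         k += 1
--     return [k] + _runs(seq[k:])
--
--
-- def check_max_eat_cnt(box):
--     n = len(box)
--     runs = []
--     for row in box:
--         runs += _runs(row[:n])
--     for i in range(n):
--         runs += _runs([box[j][i] for j in range(n)])
--     return max(runs)
-- ===== Notes on version B (the rewrite author's own statement) =====
-- stated objective: alternative
-- what changed: B replaces A's pairwise-comparison counter loops over index pairs (j-1,j) with a recursive run-splitting helper that slices each row/column into maximal equal runs and concatenates the run lengths, then takes the max.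
-- outside the precondition, e.g. on check_max_eat_cnt([]): A raises ValueError, B raises ValueError; on check_max_eat_cnt([[]]): A returns 1, B raises IndexError
import Mathlib
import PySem

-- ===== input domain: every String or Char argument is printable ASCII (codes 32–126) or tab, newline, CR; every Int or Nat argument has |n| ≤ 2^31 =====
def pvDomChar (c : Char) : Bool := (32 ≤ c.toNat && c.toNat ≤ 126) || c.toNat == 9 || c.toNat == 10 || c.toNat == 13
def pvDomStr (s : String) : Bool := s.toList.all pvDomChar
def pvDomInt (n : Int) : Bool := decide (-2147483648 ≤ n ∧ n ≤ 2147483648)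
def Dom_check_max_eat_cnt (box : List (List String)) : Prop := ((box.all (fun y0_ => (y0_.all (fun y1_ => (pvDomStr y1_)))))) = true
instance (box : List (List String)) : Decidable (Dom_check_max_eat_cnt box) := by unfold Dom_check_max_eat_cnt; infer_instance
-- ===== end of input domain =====

-- B replaces A's pairwise-comparison counter loops with a recursive run-splitting helper; same O(n^2) cost.

-- ===== PORT A =====
-- literal port of A: two index loops with a (answer, cnt) pairwise counter, then max(answer)
def check_max_eat_cnt (box : List (List String)) : Int :=
  let n : Int := box.length
  let answer1 : List Int := (PySem.List.pyRange 0 n 1).foldl (fun (answer : List Int) i =>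
    let p := (PySem.List.pyRange 1 n 1).foldl (fun (p : List Int × Int) j =>
      if PySem.List.pyGetD (PySem.List.pyGetD box i []) (j - 1) "" ==
         PySem.List.pyGetD (PySem.List.pyGetD box i []) j "" then (p.1, p.2 + 1)
      else (p.1 ++ [p.2], 1)) (answer, (1 : Int))
    p.1 ++ [p.2]) []
  let answer2 : List Int := (PySem.List.pyRange 0 n 1).foldl (fun (answer : List Int) i =>
    let p := (PySem.List.pyRange 1 n 1).foldl (fun (p : List Int × Int) j =>
      if PySem.List.pyGetD (PySem.List.pyGetD box (j - 1) []) i "" ==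
         PySem.List.pyGetD (PySem.List.pyGetD box j []) i "" then (p.1, p.2 + 1)
      else (p.1 ++ [p.2], 1)) (answer, (1 : Int))
    p.1 ++ [p.2]) answer1
  (PySem.List.max? answer2 (fun x => x)).getD 0

-- ===== PORT B =====
-- the while loop of _runs: length of the prefix of l equal to a
def pvPrefLen (a : String) : List String → Nat
  | [] => 0
  | x :: xs => if x == a then pvPrefLen a xs + 1 else 0

-- recursive run-splitting (_runs in Source B)
def pvRuns : List String → List Int
  | [] => []
  | x :: rest =>
      ((1 + pvPrefLen x rest : Nat) : Int) :: pvRuns (rest.drop (pvPrefLen x rest))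
termination_by l => l.length
decreasing_by
  simp only [List.length_drop, List.length_cons]; omega

def check_max_eat_cnt_alt (box : List (List String)) : Int :=
  let n : Int := box.length
  let runs1 : List Int := box.foldl (fun (runs : List Int) row =>
    runs ++ pvRuns (PySem.List.slice row none (some n))) []
  let runs2 : List Int := (PySem.List.pyRange 0 n 1).foldl (fun (runs : List Int) i =>
    runs ++ pvRuns ((PySem.List.pyRange 0 n 1).map
      (fun j => PySem.List.pyGetD (PySem.List.pyGetD box j []) i ""))) runs1
  (PySem.List.max? runs2 (fun x => x)).getD 0

-- ===== PRECONDITION & SPEC =====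
-- Pre_ excludes the empty box (A's max([]) raises ValueError) and boxes with a row shorter
-- than len(box): there A's index loops raise IndexError, except in the accidental len(box)=1
-- case where A's loops compare nothing and return 1 while B's column comprehension still raises.
def Pre_check_max_eat_cnt (box : List (List String)) : Prop :=
  box ≠ [] ∧ ∀ row ∈ box, box.length ≤ row.length
instance (box : List (List String)) : Decidable (Pre_check_max_eat_cnt box) := by
  unfold Pre_check_max_eat_cnt; infer_instance
def pvWitness_check_max_eat_cnt : List (List String) := [["a", "a"], ["a", "b"]]

def Spec_check_max_eat_cnt (box : List (List String)) (out : Int) : Prop := out = check_max_eat_cnt_alt box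
instance (box : List (List String)) (out : Int) : Decidable (Spec_check_max_eat_cnt box out) := by unfold Spec_check_max_eat_cnt; infer_instance

-- ===== CLAIM (what is proved, stated in full; the proofs are below) =====
def Claim_equal_check_max_eat_cnt : Prop := ∀ (box : List (List String)), Dom_check_max_eat_cnt box → Pre_check_max_eat_cnt box → Spec_check_max_eat_cnt box (check_max_eat_cnt box)

-- ===== LEMMAS AND PROOFS =====

lemma pvRuns_cons (x : String) (rest : List String) :
    pvRuns (x :: rest) =
      ((1 + pvPrefLen x rest : Nat) : Int) :: pvRuns (rest.drop (pvPrefLen x rest)) := by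
  rw [pvRuns]

-- structural version of A's inner counter loop, used only in the proofs
def loopP (acc : List Int) (cnt : Int) (prev : String) : List String → List Int × Int
  | [] => (acc, cnt)
  | y :: ys => if prev == y then loopP acc (cnt + 1) y ys else loopP (acc ++ [cnt]) 1 y ys

lemma loopP_runs (l : List String) : ∀ (acc : List Int) (cnt : Int) (prev : String),
    (loopP acc cnt prev l).1 ++ [(loopP acc cnt prev l).2] =
      acc ++ (cnt + pvPrefLen prev l) :: pvRuns (l.drop (pvPrefLen prev l)) := by
  induction l with
  | nil =>
    intro acc cnt prev
    rw [loopP]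
    simp [pvPrefLen, pvRuns]
  | cons y ys ih =>
    intro acc cnt prev
    rw [loopP]
    by_cases h : prev == y
    · rw [if_pos h, ih, beq_iff_eq.mp h]
      have hp : pvPrefLen y (y :: ys) = pvPrefLen y ys + 1 := by simp [pvPrefLen]
      rw [hp, List.drop_succ_cons]
      push_cast
      ring_nf
    · rw [if_neg h, ih]
      have h' : ¬ (y == prev) = true := by
        simp only [beq_iff_eq] at h ⊢
        exact fun e => h e.symm
      have h0 : pvPrefLen prev (y :: ys) = 0 := by
        rw [pvPrefLen, if_neg h']
      rw [h0]
      simp only [List.drop_zero, Nat.cast_zero, add_zero]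
      rw [pvRuns_cons]
      push_cast
      simp

lemma foldl_eq_loopP (L : List String) (m : Nat) : ∀ (k : Nat) (_hL : L.length = k + 1 + m)
    (acc : List Int) (cnt : Int),
    (PySem.List.pyRange ((k : Int) + 1) (L.length : Int) 1).foldl
      (fun (p : List Int × Int) j =>
        if PySem.List.pyGetD L (j - 1) "" == PySem.List.pyGetD L j "" then (p.1, p.2 + 1)
        else (p.1 ++ [p.2], 1)) (acc, cnt)
      = loopP acc cnt (L.get ⟨k, by omega⟩) (L.drop (k + 1)) := by
  induction m with
  | zero =>
    intro k hL acc cnt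
    have hle : (L.length : Int) ≤ (k : Int) + 1 := by omega
    rw [PySem.List.pyRange_one_eq_nil hle]
    have hd : L.drop (k + 1) = [] := List.drop_eq_nil_of_le (by omega)
    rw [hd]
    rfl
  | succ m ih =>
    intro k hL acc cnt
    have hk1 : k + 1 < L.length := by omega
    have hk : k < L.length := by omega
    have hlt : ((k : Int) + 1) < (L.length : Int) := by exact_mod_cast (by omega : (k + 1 : Int) < (L.length : Nat))
    rw [PySem.List.pyRange_one_cons hlt]
    rw [List.foldl_cons]
    have e1 : PySem.List.pyGetD L ((k : Int) + 1 - 1) "" = L.get ⟨k, hk⟩ := by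
      have h2 : ((k : Int) + 1 - 1) = ((k : Nat) : Int) := by ring
      rw [h2, PySem.List.pyGetD_natCast]
      simp [List.getD_eq_getElem?_getD, List.getElem?_eq_getElem hk]
    have e2 : PySem.List.pyGetD L ((k : Int) + 1) "" = L.get ⟨k + 1, hk1⟩ := by
      have h2 : ((k : Int) + 1) = ((k + 1 : Nat) : Int) := by push_cast; ring
      rw [h2, PySem.List.pyGetD_natCast]
      simp [List.getD_eq_getElem?_getD, List.getElem?_eq_getElem hk1]
    have hdrop : L.drop (k + 1) = L.get ⟨k + 1, hk1⟩ :: L.drop (k + 1 + 1) := by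
      rw [List.drop_eq_getElem_cons hk1]
      rfl
    have hcast : ((k : Int) + 1 + 1) = (((k + 1 : Nat) : Int) + 1) := by push_cast; ring
    rw [e1, e2, hdrop, loopP]
    by_cases h : L.get ⟨k, hk⟩ == L.get ⟨k + 1, hk1⟩
    · rw [if_pos h, if_pos h, hcast, ih (k + 1) (by omega) acc (cnt + 1)]
    · rw [if_neg h, if_neg h, hcast, ih (k + 1) (by omega) (acc ++ [cnt]) 1]

-- A's whole inner counter loop on a nonempty line L appends exactly the run lengths of L
lemma lineRuns (L : List String) (hL : L ≠ []) (answer : List Int) :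
    (let p := (PySem.List.pyRange 1 (L.length : Int) 1).foldl
      (fun (p : List Int × Int) j =>
        if PySem.List.pyGetD L (j - 1) "" == PySem.List.pyGetD L j "" then (p.1, p.2 + 1)
        else (p.1 ++ [p.2], 1)) (answer, (1 : Int))
     p.1 ++ [p.2]) = answer ++ pvRuns L := by
  obtain ⟨x, xs, rfl⟩ : ∃ x xs, L = x :: xs := by
    cases L with
    | nil => exact absurd rfl hL
    | cons a as => exact ⟨a, as, rfl⟩
  have hlen : (x :: xs).length = 0 + 1 + xs.length := by simp [Nat.add_comm]
  have h := foldl_eq_loopP (x :: xs) xs.length 0 hlen answer 1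
  simp only [Nat.cast_zero, zero_add] at h
  simp only []
  rw [h]
  have hget : (x :: xs).get ⟨0, by simp⟩ = x := rfl
  have hdrop : (x :: xs).drop 1 = xs := rfl
  rw [hget, hdrop, loopP_runs, pvRuns_cons]
  push_cast
  ring_nf

lemma foldl_congr_eq {α β : Type} (l : List α) (f g : β → α → β) (a b : β)
    (hab : a = b) (h : ∀ x ∈ l, ∀ acc, f acc x = g acc x) : l.foldl f a = l.foldl g b := by
  subst hab
  induction l generalizing a with
  | nil => rfl
  | cons y ys ih =>
    rw [List.foldl_cons, List.foldl_cons, h y (by simp) a]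
    exact ih _ (fun x hx acc => h x (List.mem_cons_of_mem y hx) acc)

-- the value accessed through take n agrees with the raw row for indices 0 ≤ j < n
lemma pyGetD_take (R : List String) (n : Nat) (j : Int) (h0 : 0 ≤ j) (hj : j < (n : Int)) :
    PySem.List.pyGetD (R.take n) j "" = PySem.List.pyGetD R j "" := by
  obtain ⟨m, rfl⟩ : ∃ m : Nat, j = (m : Int) := ⟨j.toNat, by omega⟩
  rw [PySem.List.pyGetD_natCast, PySem.List.pyGetD_natCast]
  have hm : m < n := by exact_mod_cast hj
  simp [List.getD_eq_getElem?_getD, hm]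

-- A's inner loop through any accessor g that agrees with list L on [0, len L)
lemma lineRuns_g (L : List String) (hL : L ≠ []) (g : Int → String)
    (hg : ∀ j : Int, 0 ≤ j → j < (L.length : Int) → g j = PySem.List.pyGetD L j "")
    (answer : List Int) :
    ((PySem.List.pyRange 1 (L.length : Int) 1).foldl
       (fun (p : List Int × Int) j =>
         if g (j - 1) == g j then (p.1, p.2 + 1) else (p.1 ++ [p.2], 1)) (answer, (1 : Int))).1 ++
      [((PySem.List.pyRange 1 (L.length : Int) 1).foldl
       (fun (p : List Int × Int) j =>
         if g (j - 1) == g j then (p.1, p.2 + 1) else (p.1 ++ [p.2], 1)) (answer, (1 : Int))).2]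
      = answer ++ pvRuns L := by
  have hc := foldl_congr_eq (PySem.List.pyRange 1 (L.length : Int) 1)
      (fun (p : List Int × Int) j =>
         if g (j - 1) == g j then (p.1, p.2 + 1) else (p.1 ++ [p.2], 1))
      (fun (p : List Int × Int) j =>
         if PySem.List.pyGetD L (j - 1) "" == PySem.List.pyGetD L j "" then (p.1, p.2 + 1)
         else (p.1 ++ [p.2], 1))
      (answer, (1 : Int)) (answer, (1 : Int)) rfl
      (fun j hj p => by
        have hm := (PySem.List.mem_pyRange_one).mp hj
        simp only [hg (j - 1) (by omega) (by omega), hg j (by omega) (by omega)])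
  rw [hc]
  exact lineRuns L hL answer

-- ===== VERDICT (by name: the statement is the Claim_ definition above) =====
theorem check_max_eat_cnt_spec : Claim_equal_check_max_eat_cnt := by
  intro box _hdom hpre
  obtain ⟨hne, hrows⟩ := hpre
  have hn : 0 < box.length := List.length_pos_iff.mpr hne
  unfold Spec_check_max_eat_cnt check_max_eat_cnt check_max_eat_cnt_alt
  simp only []
  congr 2
  rw [PySem.List.foldl_pyRange_zero_pyGetD' box ([] : List String)
      (fun (answer : List Int) (R : List String) =>
        (List.foldl (fun (p : List Int × Int) j =>
            if PySem.List.pyGetD R (j - 1) "" == PySem.List.pyGetD R j "" then (p.1, p.2 + 1)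
            else (p.1 ++ [p.2], 1)) (answer, (1 : Int)) (PySem.List.pyRange 1 (box.length : Int) 1)).1 ++
         [(List.foldl (fun (p : List Int × Int) j =>
            if PySem.List.pyGetD R (j - 1) "" == PySem.List.pyGetD R j "" then (p.1, p.2 + 1)
            else (p.1 ++ [p.2], 1)) (answer, (1 : Int)) (PySem.List.pyRange 1 (box.length : Int) 1)).2])
      ([] : List Int)]
  apply foldl_congr_eq
  · -- the two row passes build the same run list
    apply foldl_congr_eq
    · rfl
    · intro R hR acc
      have hlenR : box.length ≤ R.length := hrows R hR
      have hsl : PySem.List.slice R none (some (box.length : Int)) = R.take box.length :=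
        PySem.List.slice_to_natCast R box.length
      rw [hsl]
      have hLlen : (R.take box.length).length = box.length := by
        rw [List.length_take]; omega
      have hLne : R.take box.length ≠ [] := List.length_pos_iff.mp (by omega)
      have hcast : ((box.length : Int)) = (((R.take box.length).length : Int)) := by rw [hLlen]
      rw [hcast]
      exact lineRuns_g (R.take box.length) hLne (fun j => PySem.List.pyGetD R j "")
        (fun j h0 hj => (pyGetD_take R box.length j h0 (by omega)).symm) acc
  · -- each column pass appends the runs of that column
    intro i _hi acc
    set L := (PySem.List.pyRange 0 (box.length : Int) 1).map
        (fun j => PySem.List.pyGetD (PySem.List.pyGetD box j []) i "") with hLdef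
    have hLlen : L.length = box.length := by
      rw [hLdef, List.length_map, PySem.List.length_pyRange_one]; omega
    have hLne : L ≠ [] := List.length_pos_iff.mp (by omega)
    have hcast : ((box.length : Int)) = ((L.length : Int)) := by rw [hLlen]
    rw [hcast]
    exact lineRuns_g L hLne (fun j => PySem.List.pyGetD (PySem.List.pyGetD box j []) i "")
      (fun j h0 hj => by
        rw [hLdef]
        exact (PySem.List.pyGetD_map_pyRange_of_nonneg
          (fun j => PySem.List.pyGetD (PySem.List.pyGetD box j []) i "")
          (box.length : Int) j "" h0 (by omega)).symm) acc
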